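-- pv_equiv track=rewrite | github.com/eliottcassidy2000/math | 04-computation/forbidden_h_achievability.py | count_disjoint_pairs
-- ===== SOURCE A (Python) =====
-- def count_disjoint_pairs(cycles):
--     """Count disjoint pairs among a list of frozensets."""
--     count = 0
--     nc = len(cycles)
--     for i in range(nc):
--         for j in range(i+1, nc):
--             if cycles[i].isdisjoint(cycles[j]):
--                 count += 1
--     return count
-- ===== SOURCE B (Python) =====
-- def count_disjoint_pairs(cycles):
--     """Count disjoint pairs among a list of frozensets.
--
--     Complement counting via an element -> indices table: total number of
--     unordered pairs minus the number of intersecting pairs (collected in a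
--     set so pairs sharing several elements are counted once)."""
--     n = len(cycles)
--     buckets = {}
--     for i, c in enumerate(cycles):
--         for x in set(c):
--             buckets.setdefault(x, []).append(i)
--     intersecting = set()
--     for idxs in buckets.values():
--         for a in range(len(idxs)):
--             for b in range(a + 1, len(idxs)):
--                 intersecting.add((idxs[a], idxs[b]))
--     return n * (n - 1) // 2 - len(intersecting)
-- ===== Notes on version B (the rewrite author's own statement) =====
-- stated objective: alternative
-- what changed: Replaces the all-pairs disjointness scan by complement counting: build an element-to-indices table once, collect the intersecting index pairs per bucket into a dedup set, and return n*(n-1)//2 minus its size; it trades per-pair set tests for work proportional to the number of intersecting pairs.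
import Mathlib
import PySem

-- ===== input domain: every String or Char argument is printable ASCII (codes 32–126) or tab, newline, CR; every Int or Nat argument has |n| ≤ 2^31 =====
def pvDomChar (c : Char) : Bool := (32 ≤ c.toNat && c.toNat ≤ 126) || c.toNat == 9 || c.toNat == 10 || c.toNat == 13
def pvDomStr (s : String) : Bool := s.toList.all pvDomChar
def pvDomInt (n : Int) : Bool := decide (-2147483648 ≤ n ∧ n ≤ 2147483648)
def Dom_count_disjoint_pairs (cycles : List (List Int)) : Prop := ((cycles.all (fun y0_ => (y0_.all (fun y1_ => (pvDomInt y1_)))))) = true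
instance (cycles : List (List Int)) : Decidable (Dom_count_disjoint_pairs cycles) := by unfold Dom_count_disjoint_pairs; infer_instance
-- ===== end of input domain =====

-- B replaces A's all-pairs disjointness scan by complement counting over a prebuilt
-- element→indices table (objective: alternative algorithm; no speed claim).

-- ===== PORT A =====
-- Python frozenset.isdisjoint is element-wise disjointness; PySem.Set.isdisjoint on the
-- element lists is exact for that test (duplicates cannot change disjointness).
def count_disjoint_pairs (cycles : List (List Int)) : Int :=
  let nc : Int := PySem.List.len cycles
  (PySem.List.pyRange 0 nc 1).foldl (fun count i =>
    (PySem.List.pyRange (i + 1) nc 1).foldl (fun count j =>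
      if PySem.Set.isdisjoint (PySem.List.pyGetD cycles i []) (PySem.List.pyGetD cycles j [])
      then count + 1 else count) count) 0

-- ===== PORT B =====
-- 'buckets.setdefault(x, []).append(i)' has exactly the effect of
-- 'buckets[x] = buckets.get(x, []) + [i]', i.e. Dict.modify x [] (· ++ [i]).
def count_disjoint_pairs_alt (cycles : List (List Int)) : Int :=
  let n : Int := PySem.List.len cycles
  let buckets : PySem.Dict Int (List Int) :=
    (PySem.List.enumerate cycles 0).foldl (fun d p =>
      (PySem.Set.ofList p.2).foldl (fun d x => d.modify x [] (· ++ [p.1])) d)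
      PySem.Dict.empty
  let intersecting : PySem.Set (Int × Int) :=
    buckets.values.foldl (fun s idxs =>
      (PySem.List.pyRange 0 (PySem.List.len idxs) 1).foldl (fun s a =>
        (PySem.List.pyRange (a + 1) (PySem.List.len idxs) 1).foldl (fun s b =>
          PySem.Set.add s (PySem.List.pyGetD idxs a 0, PySem.List.pyGetD idxs b 0)) s) s)
      PySem.Set.empty
  PySem.Int.floordiv (n * (n - 1)) 2 - PySem.List.len intersecting

-- ===== PRECONDITION & SPEC =====
def Spec_count_disjoint_pairs (cycles : List (List Int)) (out : Int) : Prop := out = count_disjoint_pairs_alt cycles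
instance (cycles : List (List Int)) (out : Int) : Decidable (Spec_count_disjoint_pairs cycles out) := by unfold Spec_count_disjoint_pairs; infer_instance

-- ===== CLAIM (what is proved, stated in full; the proofs are below) =====
def Claim_equal_count_disjoint_pairs : Prop := ∀ (cycles : List (List Int)), Dom_count_disjoint_pairs cycles → Spec_count_disjoint_pairs cycles (count_disjoint_pairs cycles)

-- ===== LEMMAS AND PROOFS =====

-- Abbreviations for the quantities the two ports compute (proof-side only).
def pvDisjB (cycles : List (List Int)) (q : Int × Int) : Bool :=
  PySem.Set.isdisjoint (PySem.List.pyGetD cycles q.1 []) (PySem.List.pyGetD cycles q.2 [])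

def pvPairs (n : Int) : List (Int × Int) :=
  (PySem.List.pyRange 0 n 1).flatMap (fun i => (PySem.List.pyRange (i + 1) n 1).map (fun j => (i, j)))

def pvOcc (cycles : List (List Int)) (y : Int) : List Int :=
  ((PySem.List.enumerate cycles 0).filter (fun p => decide (y ∈ p.2))).map (·.1)

def pvInterP (cycles : List (List Int)) (q : Int × Int) : Prop :=
  0 ≤ q.1 ∧ q.1 < q.2 ∧ q.2 < (cycles.length : Int) ∧
    ∃ y, y ∈ PySem.List.pyGetD cycles q.1 [] ∧ y ∈ PySem.List.pyGetD cycles q.2 []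

-- generic fold lemmas for membership / nodup of set-accumulating loops
theorem pvFoldl_mem_iff {α β : Type} (l : List β) (step : List α → β → List α)
    (Q : β → α → Prop) (h : ∀ s b, b ∈ l → ∀ x, (x ∈ step s b ↔ x ∈ s ∨ Q b x))
    (s : List α) (x : α) : x ∈ l.foldl step s ↔ x ∈ s ∨ ∃ b ∈ l, Q b x := by
  induction l generalizing s with
  | nil => simp
  | cons b l ih =>
    simp only [List.foldl_cons]
    rw [ih (fun s c hc x => h s c (List.mem_cons_of_mem _ hc) x),
      h s b (List.mem_cons_self) x]
    simp only [List.mem_cons]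
    constructor
    · rintro ((hx | hq) | ⟨c, hc, hq⟩)
      · exact Or.inl hx
      · exact Or.inr ⟨b, Or.inl rfl, hq⟩
      · exact Or.inr ⟨c, Or.inr hc, hq⟩
    · rintro (hx | ⟨c, (rfl | hc), hq⟩)
      · exact Or.inl (Or.inl hx)
      · exact Or.inl (Or.inr hq)
      · exact Or.inr ⟨c, hc, hq⟩

theorem pvFoldl_nodup {α β : Type} (l : List β) (step : List α → β → List α)
    (h : ∀ s b, s.Nodup → (step s b).Nodup) (s : List α) (hs : s.Nodup) :
    (l.foldl step s).Nodup := by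
  induction l generalizing s with
  | nil => exact hs
  | cons b l ih => exact ih _ (h _ _ hs)

-- the per-cycle dict update: effect on one key
theorem pvInner_getD (s : List Int) (hs : s.Nodup) (i y : Int)
    (d : PySem.Dict Int (List Int)) :
    (s.foldl (fun d x => d.modify x [] (· ++ [i])) d).getD y [] =
      if y ∈ s then d.getD y [] ++ [i] else d.getD y [] := by
  induction s generalizing d with
  | nil => simp
  | cons a s ih =>
    rcases List.nodup_cons.1 hs with ⟨ha, hs'⟩
    simp only [List.foldl_cons]
    rw [ih hs']
    by_cases hy : y = a
    · subst hy
      have hns : y ∉ s := ha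
      simp [hns]
    · by_cases hys : y ∈ s <;>
        simp [hy, hys, PySem.Dict.getD_modify, List.mem_cons]

-- the bucket-building loop: every key holds exactly the indices of the cycles containing it
theorem pvBuckets_getD (xs : List (List Int)) (s0 : Int)
    (d : PySem.Dict Int (List Int)) (y : Int) :
    ((PySem.List.enumerate xs s0).foldl
        (fun d p => (PySem.Set.ofList p.2).foldl
          (fun d x => d.modify x [] (· ++ [p.1])) d) d).getD y [] =
      d.getD y [] ++
        ((PySem.List.enumerate xs s0).filter (fun p => decide (y ∈ p.2))).map (·.1) := by
  induction xs generalizing s0 d with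
  | nil => simp [PySem.List.enumerate_nil]
  | cons c xs ih =>
    rw [PySem.List.enumerate_cons]
    simp only [List.foldl_cons, List.filter_cons]
    rw [ih, pvInner_getD _ (PySem.Set.nodup_ofList _)]
    by_cases h : y ∈ c <;>
      simp [h, PySem.Set.mem_ofList, List.append_assoc]

theorem pvBuckets_keys_mem (xs : List (List Int)) (s0 : Int)
    (d : PySem.Dict Int (List Int)) (y : Int) :
    (y ∈ ((PySem.List.enumerate xs s0).foldl
        (fun d p => (PySem.Set.ofList p.2).foldl
          (fun d x => d.modify x [] (· ++ [p.1])) d) d).keys) ↔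
      y ∈ d.keys ∨ ∃ p ∈ PySem.List.enumerate xs s0, y ∈ p.2 := by
  induction xs generalizing s0 d with
  | nil => simp [PySem.List.enumerate_nil]
  | cons c xs ih =>
    rw [PySem.List.enumerate_cons]
    simp only [List.foldl_cons]
    rw [ih]
    rw [PySem.Dict.keys_foldl_modify (PySem.Set.ofList c) [] (fun _ _ v => v ++ [s0]) d]
    rw [PySem.Set.mem_update]
    simp only [PySem.Set.mem_ofList, List.mem_cons]
    constructor
    · rintro ((hk | hc) | ⟨p, hp, hyp⟩)
      · exact Or.inl hk
      · exact Or.inr ⟨(s0, c), Or.inl rfl, hc⟩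
      · exact Or.inr ⟨p, Or.inr hp, hyp⟩
    · rintro (hk | ⟨p, (rfl | hp), hyp⟩)
      · exact Or.inl (Or.inl hk)
      · exact Or.inl (Or.inr hyp)
      · exact Or.inr ⟨p, hp, hyp⟩

theorem pvBuckets_keys_nodup (xs : List (List Int)) (s0 : Int)
    (d : PySem.Dict Int (List Int)) (h : d.keys.Nodup) :
    ((PySem.List.enumerate xs s0).foldl
        (fun d p => (PySem.Set.ofList p.2).foldl
          (fun d x => d.modify x [] (· ++ [p.1])) d) d).keys.Nodup := by
  induction xs generalizing s0 d with
  | nil => simpa [PySem.List.enumerate_nil]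
  | cons c xs ih =>
    rw [PySem.List.enumerate_cons]
    simp only [List.foldl_cons]
    exact ih _ _ (PySem.Dict.nodup_keys_foldl_modify_key (PySem.Set.ofList c)
      (fun x => x) [] (fun _ _ v => v ++ [s0]) d h)

theorem pvOcc_sorted (cycles : List (List Int)) (y : Int) :
    (pvOcc cycles y).Pairwise (· < ·) := by
  unfold pvOcc
  rw [List.pairwise_map]
  exact (PySem.List.pairwise_lt_enumerate cycles 0).filter _

theorem pvOcc_mem (cycles : List (List Int)) (y i : Int) :
    i ∈ pvOcc cycles y ↔
      ∃ (k : Nat) (h : k < cycles.length), i = (k : Int) ∧ y ∈ cycles[k] := by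
  unfold pvOcc
  simp only [List.mem_map, List.mem_filter, PySem.List.mem_enumerate_iff]
  constructor
  · rintro ⟨p, ⟨⟨k, hk, rfl⟩, hy⟩, rfl⟩
    simp only [decide_eq_true_eq] at hy
    exact ⟨k, hk, by simpa using hy⟩
  · rintro ⟨k, hk, rfl, hy⟩
    exact ⟨((k : Int), cycles[k]), ⟨⟨k, hk, by simp⟩, by simpa using hy⟩, rfl⟩

-- the per-bucket double loop collects exactly the increasing element pairs of a sorted bucket
theorem pvPairFold_mem (idxs : List Int) (hs : idxs.Pairwise (· < ·))
    (s : List (Int × Int)) (q : Int × Int) :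
    (q ∈ (PySem.List.pyRange 0 (PySem.List.len idxs) 1).foldl
        (fun s a => (PySem.List.pyRange (a + 1) (PySem.List.len idxs) 1).foldl
          (fun s b => PySem.Set.add s (PySem.List.pyGetD idxs a 0, PySem.List.pyGetD idxs b 0)) s) s) ↔
      q ∈ s ∨ (q.1 ∈ idxs ∧ q.2 ∈ idxs ∧ q.1 < q.2) := by
  rw [pvFoldl_mem_iff _ _
    (fun a q => ∃ b, a + 1 ≤ b ∧ b < PySem.List.len idxs ∧
      q = (PySem.List.pyGetD idxs a 0, PySem.List.pyGetD idxs b 0))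
    (fun s a _ x => by
      rw [pvFoldl_mem_iff _ _
        (fun b q => q = (PySem.List.pyGetD idxs a 0, PySem.List.pyGetD idxs b 0))
        (fun s b _ x => by rw [PySem.Set.mem_add])]
      simp only [PySem.List.mem_pyRange_one]
      constructor
      · rintro (h | ⟨b, ⟨h1, h2⟩, rfl⟩)
        · exact Or.inl h
        · exact Or.inr ⟨b, h1, h2, rfl⟩
      · rintro (h | ⟨b, h1, h2, rfl⟩)
        · exact Or.inl h
        · exact Or.inr ⟨b, ⟨h1, h2⟩, rfl⟩)]
  simp only [PySem.List.mem_pyRange_one, PySem.List.len_eq]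
  constructor
  · rintro (h | ⟨a, ⟨ha0, haN⟩, b, hab, hbN, rfl⟩)
    · exact Or.inl h
    · refine Or.inr ?_
      have hb0 : (0:Int) ≤ b := by omega
      rw [PySem.List.pyGetD_eq_getElem idxs 0 ha0 haN,
        PySem.List.pyGetD_eq_getElem idxs 0 hb0 hbN]
      have hlt : a.toNat < b.toNat := by omega
      have haL : a.toNat < idxs.length := by omega
      have hbL : b.toNat < idxs.length := by omega
      exact ⟨List.getElem_mem _, List.getElem_mem _,
        List.pairwise_iff_getElem.1 hs a.toNat b.toNat haL hbL hlt⟩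
  · rintro (h | ⟨h1, h2, hlt⟩)
    · exact Or.inl h
    · refine Or.inr ?_
      obtain ⟨a, haL, ha⟩ := List.getElem_of_mem h1
      obtain ⟨b, hbL, hb⟩ := List.getElem_of_mem h2
      have hab : a < b := by
        rcases Nat.lt_trichotomy a b with h | h | h
        · exact h
        · exfalso; subst h; rw [ha] at hb; omega
        · exfalso
          have := List.pairwise_iff_getElem.1 hs b a hbL haL h
          omega
      refine ⟨(a : Int), ⟨by omega, by exact_mod_cast haL⟩,
        (b : Int), by omega, by exact_mod_cast hbL, ?_⟩
      rw [PySem.List.pyGetD_eq_getElem idxs 0 (by omega) (by exact_mod_cast haL),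
        PySem.List.pyGetD_eq_getElem idxs 0 (by omega) (by exact_mod_cast hbL)]
      simp only [Int.toNat_natCast]
      rw [ha, hb]

theorem pvPairFold_nodup (idxs : List Int) (s : List (Int × Int)) (hs : s.Nodup) :
    ((PySem.List.pyRange 0 (PySem.List.len idxs) 1).foldl
        (fun s a => (PySem.List.pyRange (a + 1) (PySem.List.len idxs) 1).foldl
          (fun s b => PySem.Set.add s (PySem.List.pyGetD idxs a 0, PySem.List.pyGetD idxs b 0)) s) s).Nodup := by
  refine pvFoldl_nodup _ _ (fun s a hsn => ?_) s hs
  exact pvFoldl_nodup _ _ (fun s b hsn => PySem.Set.nodup_add _ _ hsn) s hsn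

theorem pvPairs_mem (n : Int) (q : Int × Int) :
    q ∈ pvPairs n ↔ 0 ≤ q.1 ∧ q.1 < q.2 ∧ q.2 < n := by
  unfold pvPairs
  simp only [List.mem_flatMap, List.mem_map, PySem.List.mem_pyRange_one]
  constructor
  · rintro ⟨i, ⟨hi0, hin⟩, j, ⟨hij, hjn⟩, rfl⟩
    exact ⟨hi0, by omega, hjn⟩
  · rintro ⟨h0, hlt, hn⟩
    exact ⟨q.1, ⟨h0, by omega⟩, q.2, ⟨by omega, hn⟩, rfl⟩

theorem pvPairs_nodup (n : Int) : (pvPairs n).Nodup := by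
  unfold pvPairs
  rw [List.nodup_flatMap]
  constructor
  · intro i _
    exact (PySem.List.nodup_pyRange_one _ _).map (fun j₁ j₂ h => congrArg Prod.snd h)
  · refine (PySem.List.nodup_pyRange_one _ _).imp ?_
    intro i i' hne q hq hq'
    obtain ⟨j, _, rfl⟩ := List.mem_map.1 hq
    obtain ⟨j', _, h⟩ := List.mem_map.1 hq'
    exact hne (congrArg Prod.fst h).symm

theorem pvSum_map_succ {β : Type} (l : List β) (f : β → Nat) :
    (l.map (fun x => f x + 1)).sum = (l.map f).sum + l.length := by
  induction l with
  | nil => simp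
  | cons b l ih => simp [ih]; omega

theorem pvLen_pairs : ∀ N : Nat, 2 * (pvPairs (N : Int)).length = N * (N - 1) := by
  intro N
  induction N with
  | zero => simp [pvPairs, PySem.List.pyRange_one_eq_nil]
  | succ M ih =>
    have hcast : ((M + 1 : Nat) : Int) = (M : Int) + 1 := by push_cast; ring
    unfold pvPairs at ih ⊢
    rw [hcast, PySem.List.pyRange_one_succ_right (by exact_mod_cast Nat.zero_le M)]
    rw [List.flatMap_append]
    have hlast : List.flatMap
        (fun i => (PySem.List.pyRange (i + 1) ((M : Int) + 1) 1).map (fun j => ((i, j) : Int × Int)))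
        [(M : Int)] = [] := by
      simp [PySem.List.pyRange_one_eq_nil (by omega : (M : Int) + 1 ≤ (M : Int) + 1)]
    rw [hlast, List.append_nil, List.length_flatMap]
    have hmap : (PySem.List.pyRange 0 (M : Int) 1).map
          (fun i => ((PySem.List.pyRange (i + 1) ((M : Int) + 1) 1).map (fun j => ((i, j) : Int × Int))).length)
        = (PySem.List.pyRange 0 (M : Int) 1).map
          (fun i => ((PySem.List.pyRange (i + 1) (M : Int) 1).map (fun j => ((i, j) : Int × Int))).length + 1) := by
      apply List.map_congr_left
      intro i hi
      have hi' := PySem.List.mem_pyRange_one.1 hi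
      rw [PySem.List.pyRange_one_succ_right (by omega)]
      simp
    rw [hmap, pvSum_map_succ, PySem.List.length_pyRange_one, ← List.length_flatMap]
    cases M with
    | zero => simp [PySem.List.pyRange_one_eq_nil]
    | succ K =>
      have ht : (((K + 1 : Nat) : Int) - 0).toNat = K + 1 := by omega
      rw [ht]
      have hr : (K + 1 + 1) * (K + 1 + 1 - 1) = (K + 1) * (K + 1 - 1) + 2 * (K + 1) := by
        simp; ring
      omega

theorem pvA_eq (cycles : List (List Int)) :
    count_disjoint_pairs cycles =
      ((pvPairs (cycles.length : Int)).countP (pvDisjB cycles) : Int) := by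
  simp only [count_disjoint_pairs, PySem.List.len_eq]
  have hinner : ∀ (c i : Int),
      (PySem.List.pyRange (i + 1) (cycles.length : Int) 1).foldl
        (fun count j => if PySem.Set.isdisjoint (PySem.List.pyGetD cycles i [])
            (PySem.List.pyGetD cycles j []) then count + 1 else count) c
      = c + (((PySem.List.pyRange (i + 1) (cycles.length : Int) 1).countP
          (fun j => pvDisjB cycles (i, j)) : Nat) : Int) :=
    fun c i => PySem.List.foldl_if_add_one (fun j => pvDisjB cycles (i, j)) _ c
  have houter := PySem.List.foldl_congr_mem
    (l := PySem.List.pyRange 0 (cycles.length : Int) 1)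
    (f := fun (count i : Int) =>
      (PySem.List.pyRange (i + 1) (cycles.length : Int) 1).foldl
        (fun count j => if PySem.Set.isdisjoint (PySem.List.pyGetD cycles i [])
            (PySem.List.pyGetD cycles j []) then count + 1 else count) count)
    (g := fun (c i : Int) =>
      c + (((PySem.List.pyRange (i + 1) (cycles.length : Int) 1).countP
        (fun j => pvDisjB cycles (i, j)) : Nat) : Int))
    (init := 0)
    (fun acc i _ => hinner acc i)
  rw [houter, PySem.List.foldl_add]
  unfold pvPairs
  rw [List.countP_flatMap]
  simp only [Function.comp_def, List.countP_map]
  rw [Nat.cast_list_sum, List.map_map]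
  simp only [Function.comp_def]
  ring

theorem pvInter_mem (cycles : List (List Int)) (q : Int × Int) :
    (q ∈ (((PySem.List.enumerate cycles 0).foldl
        (fun d p => (PySem.Set.ofList p.2).foldl (fun d x => d.modify x [] (· ++ [p.1])) d)
        PySem.Dict.empty).values.foldl
        (fun s idxs => (PySem.List.pyRange 0 (PySem.List.len idxs) 1).foldl
          (fun s a => (PySem.List.pyRange (a + 1) (PySem.List.len idxs) 1).foldl
            (fun s b => PySem.Set.add s (PySem.List.pyGetD idxs a 0, PySem.List.pyGetD idxs b 0)) s) s)
        PySem.Set.empty)) ↔ pvInterP cycles q := by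
  obtain ⟨u, v⟩ := q
  unfold pvInterP
  dsimp only
  set bk := (PySem.List.enumerate cycles 0).foldl
      (fun d p => (PySem.Set.ofList p.2).foldl (fun d x => d.modify x [] (· ++ [p.1])) d)
      PySem.Dict.empty with hbk
  have hkn : bk.keys.Nodup := pvBuckets_keys_nodup _ _ _ PySem.Dict.nodup_keys_empty
  have hval : bk.values = bk.keys.map (fun k => bk.getD k []) :=
    PySem.Dict.values_eq_map_keys bk hkn []
  have hocc : ∀ y, bk.getD y [] = pvOcc cycles y := by
    intro y
    rw [hbk, pvBuckets_getD]
    simp [PySem.Dict.getD_empty, pvOcc]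
  have hkeys : ∀ y, y ∈ bk.keys ↔ ∃ p ∈ PySem.List.enumerate cycles 0, y ∈ p.2 := by
    intro y
    rw [hbk, pvBuckets_keys_mem]
    simp [PySem.Dict.keys_empty]
  have hsorted : ∀ idxs ∈ bk.values, idxs.Pairwise (· < ·) := by
    rw [hval]
    intro idxs hidx
    obtain ⟨y, _, rfl⟩ := List.mem_map.1 hidx
    rw [hocc]
    exact pvOcc_sorted cycles y
  rw [pvFoldl_mem_iff _ _ (fun idxs q => q.1 ∈ idxs ∧ q.2 ∈ idxs ∧ q.1 < q.2)
    (fun s idxs hidx x => pvPairFold_mem idxs (hsorted idxs hidx) s x)]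
  constructor
  · rintro (h | ⟨idxs, hidx, h1, h2, hlt⟩)
    · exact absurd h (List.not_mem_nil)
    · rw [hval] at hidx
      obtain ⟨y, hyk, rfl⟩ := List.mem_map.1 hidx
      rw [hocc] at h1 h2
      obtain ⟨k1, hk1, rfl, hy1⟩ := (pvOcc_mem _ _ _).1 h1
      obtain ⟨k2, hk2, rfl, hy2⟩ := (pvOcc_mem _ _ _).1 h2
      refine ⟨Int.natCast_nonneg k1, hlt, by exact_mod_cast hk2, y, ?_, ?_⟩
      · rw [PySem.List.pyGetD_eq_getElem cycles [] (Int.natCast_nonneg k1)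
          (by exact_mod_cast hk1)]
        simpa using hy1
      · rw [PySem.List.pyGetD_eq_getElem cycles [] (Int.natCast_nonneg k2)
          (by exact_mod_cast hk2)]
        simpa using hy2
  · rintro ⟨h0, hlt, hn, y, hy1, hy2⟩
    have hk1 : u.toNat < cycles.length := by omega
    have hk2 : v.toNat < cycles.length := by omega
    rw [PySem.List.pyGetD_eq_getElem cycles [] h0 (by omega)] at hy1
    rw [PySem.List.pyGetD_eq_getElem cycles [] (by omega) (by omega)] at hy2
    have hyk : y ∈ bk.keys := by
      rw [hkeys]
      refine ⟨((u.toNat : Int), cycles[u.toNat]), ?_, hy1⟩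
      rw [PySem.List.mem_enumerate_iff]
      exact ⟨u.toNat, hk1, by simp⟩
    refine Or.inr ⟨pvOcc cycles y, ?_, ?_, ?_, hlt⟩
    · rw [hval]
      exact List.mem_map.2 ⟨y, hyk, hocc y⟩
    · rw [pvOcc_mem]
      exact ⟨u.toNat, hk1, by omega, hy1⟩
    · rw [pvOcc_mem]
      exact ⟨v.toNat, hk2, by omega, hy2⟩

theorem pvInterP_iff (cycles : List (List Int)) (q : Int × Int) :
    pvInterP cycles q ↔ (q ∈ pvPairs (cycles.length : Int) ∧ (!pvDisjB cycles q) = true) := by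
  rw [pvPairs_mem]
  unfold pvInterP
  have hb : (!pvDisjB cycles q) = true ↔
      ∃ y, y ∈ PySem.List.pyGetD cycles q.1 [] ∧ y ∈ PySem.List.pyGetD cycles q.2 [] := by
    rw [Bool.not_eq_true']
    rw [← Bool.not_eq_true]
    unfold pvDisjB
    rw [PySem.Set.isdisjoint_iff]
    push Not
    simp
  rw [hb]
  tauto

theorem pvFloordiv_pairs (N : Nat) :
    PySem.Int.floordiv ((N : Int) * ((N : Int) - 1)) 2 = ((pvPairs (N : Int)).length : Int) := by
  have h := pvLen_pairs N
  have h2 : (N : Int) * ((N : Int) - 1) = 2 * ((pvPairs (N : Int)).length : Int) := by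
    cases N with
    | zero =>
      have hz : (pvPairs ((0 : Nat) : Int)).length = 0 := by omega
      rw [hz]; simp
    | succ M =>
      rw [Nat.succ_sub_one] at h
      have hc := congrArg (Nat.cast (R := Int)) h
      push_cast at hc ⊢
      linarith
  rw [h2, PySem.Int.floordiv_eq_ediv_of_pos (by norm_num)]
  exact Int.mul_ediv_cancel_left _ (by norm_num)

theorem pvAlt_eq (cycles : List (List Int)) :
    count_disjoint_pairs_alt cycles =
      PySem.Int.floordiv ((cycles.length : Int) * ((cycles.length : Int) - 1)) 2 -
        ((pvPairs (cycles.length : Int)).countP (fun q => !pvDisjB cycles q) : Int) := by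
  simp only [count_disjoint_pairs_alt]
  rw [PySem.List.len_eq, PySem.List.len_eq]
  congr 1
  have hnd : (((PySem.List.enumerate cycles 0).foldl
      (fun d p => (PySem.Set.ofList p.2).foldl (fun d x => d.modify x [] (· ++ [p.1])) d)
      PySem.Dict.empty).values.foldl
      (fun s idxs => (PySem.List.pyRange 0 (PySem.List.len idxs) 1).foldl
        (fun s a => (PySem.List.pyRange (a + 1) (PySem.List.len idxs) 1).foldl
          (fun s b => PySem.Set.add s (PySem.List.pyGetD idxs a 0, PySem.List.pyGetD idxs b 0)) s) s)
      PySem.Set.empty).Nodup :=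
    pvFoldl_nodup _ _ (fun s idxs hs => pvPairFold_nodup idxs s hs) _ List.nodup_nil
  have hperm := (List.perm_ext_iff_of_nodup hnd
    ((pvPairs_nodup (cycles.length : Int)).filter _)).2
    (fun q => by rw [pvInter_mem, List.mem_filter, ← pvInterP_iff])
  rw [List.countP_eq_length_filter, ← hperm.length_eq]

-- ===== VERDICT (by name: the statement is the Claim_ definition above) =====
theorem count_disjoint_pairs_spec : Claim_equal_count_disjoint_pairs := by
  intro cycles _
  unfold Spec_count_disjoint_pairs
  rw [pvA_eq, pvAlt_eq, pvFloordiv_pairs cycles.length]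
  have h := List.length_eq_countP_add_countP (pvDisjB cycles)
    (l := pvPairs (cycles.length : Int))
  have hc : (fun a => decide (¬ pvDisjB cycles a = true)) =
      (fun q => !pvDisjB cycles q) := by
    funext a; simp
  rw [hc] at h
  omega
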